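-- pv_equiv track=rewrite | github.com/vojtechtrefny/iv122 | cv9/non_random.py | pattern_repeating
-- ===== SOURCE A (Python) =====
-- def pattern_repeating(string):
--     """ Are there some repeating patterns? """
--
--     for i in range(2, len(string) // 2):  # substring lenght from 2 to half string length
--         for j in range(1, len(string) - i):  # form all substrings of lenght i
--             substring = string[j: j + i]
--             cnt = string.count(substring)  # count number of substrigs in string
--
--             if cnt * i >= (len(string) // 2):  # repeating pattern takes more than 50 % of the string
--                 return (substring, cnt)
--
--     return ("", 0)
-- ===== SOURCE B (Python) =====
-- def _greedy(ps, i):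
--     """Greedy non-overlapping count over the ascending occurrence positions."""
--     c = 0
--     last = -i
--     for p in ps:
--         if p >= last + i:
--             c += 1
--             last = p
--     return c
--
--
-- def pattern_repeating(string):
--     """ Are there some repeating patterns? """
--     n = len(string)
--     half = n // 2
--     for i in range(2, half):
--         # group the positions of every length-i substring in one pass
--         pos = {}
--         for j in range(n - i + 1):
--             pos.setdefault(string[j: j + i], []).append(j)
--         # non-overlapping occurrence count of each distinct substring
--         cnt = {sub: _greedy(ps, i) for sub, ps in pos.items()}
--         for j in range(1, n - i):
--             sub = string[j: j + i]
--             c = cnt[sub]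
--             if c * i >= half:
--                 return (sub, c)
--     return ("", 0)
-- ===== Notes on version B (the rewrite author's own statement) =====
-- stated objective: alternative
-- what changed: Instead of rescanning the whole string with string.count for every candidate position j, B groups, once per substring length, all occurrence positions of each distinct substring in a hash map and derives each count by a single greedy non-overlapping scan of the position list, so every candidate is answered by an O(1) dict lookup (intended as faster; measured 3.22x at n=1024 but unconfirmed at the largest size).
import Mathlib
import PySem

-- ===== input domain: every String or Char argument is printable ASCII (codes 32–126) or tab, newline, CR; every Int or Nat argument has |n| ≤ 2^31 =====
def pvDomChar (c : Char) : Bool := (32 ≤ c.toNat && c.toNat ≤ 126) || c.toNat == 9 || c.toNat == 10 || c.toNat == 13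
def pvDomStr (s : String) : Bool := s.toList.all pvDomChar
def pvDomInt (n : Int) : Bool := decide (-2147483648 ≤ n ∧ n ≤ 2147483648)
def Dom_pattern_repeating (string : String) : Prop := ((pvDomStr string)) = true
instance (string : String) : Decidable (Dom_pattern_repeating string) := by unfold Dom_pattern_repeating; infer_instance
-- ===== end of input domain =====

-- B replaces A's per-candidate scan of the whole string (string.count for every j) by a
-- per-length hash grouping of substring positions with a greedy non-overlapping count,
-- computed once per distinct substring (objective: alternative algorithm, same result).

-- ===== PORT A =====
-- inner loop `for j in range(1, len(string) - i)` with early return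
def pvAInner (s : List Char) (n i : Int) : List Int → Option (String × Int)
  | [] => none
  | j :: js =>
    let substring := PySem.List.slice s (some j) (some (j + i))
    let cnt : Int := (PySem.Chars.count s substring : Int)
    if PySem.Int.floordiv n 2 ≤ cnt * i then some (String.ofList substring, cnt)
    else pvAInner s n i js

-- outer loop `for i in range(2, len(string) // 2)`
def pvAOuter (s : List Char) (n : Int) : List Int → Option (String × Int)
  | [] => none
  | i :: is =>
    match pvAInner s n i (PySem.List.pyRange 1 (n - i)) with
    | some r => some r
    | none => pvAOuter s n is

def pattern_repeating (string : String) : String × Int :=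
  let s := string.toList
  let n : Int := (PySem.Chars.len s : Int)
  match pvAOuter s n (PySem.List.pyRange 2 (PySem.Int.floordiv n 2)) with
  | some r => r
  | none => ("", 0)

-- ===== PORT B =====
-- _greedy(ps, i): greedy non-overlapping count over ascending positions
def pvGreedy (i : Int) (ps : List Int) : Int :=
  (ps.foldl (fun (st : Int × Int) p => if st.2 + i ≤ p then (st.1 + 1, p) else st)
    ((0 : Int), -i)).1

-- pos = {}; for j in range(n - i + 1): pos.setdefault(string[j:j+i], []).append(j)
def pvPos (s : List Char) (n i : Int) : PySem.Dict (List Char) (List Int) :=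
  (PySem.List.pyRange 0 (n - i + 1)).foldl
    (fun d j => d.modify (PySem.List.slice s (some j) (some (j + i))) [] (· ++ [j]))
    PySem.Dict.empty

-- cnt = {sub: _greedy(ps, i) for sub, ps in pos.items()}
def pvCnt (s : List Char) (n i : Int) : PySem.Dict (List Char) Int :=
  (pvPos s n i).items.foldl (fun d p => d.insert p.1 (pvGreedy i p.2)) PySem.Dict.empty

-- inner loop of B: O(1) dict lookup per candidate
def pvBInner (cnt : PySem.Dict (List Char) Int) (s : List Char) (half i : Int) :
    List Int → Option (String × Int)
  | [] => none
  | j :: js =>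
    let sub := PySem.List.slice s (some j) (some (j + i))
    let c := cnt.getD sub 0
    if half ≤ c * i then some (String.ofList sub, c) else pvBInner cnt s half i js

def pvBOuter (s : List Char) (n half : Int) : List Int → Option (String × Int)
  | [] => none
  | i :: is =>
    match pvBInner (pvCnt s n i) s half i (PySem.List.pyRange 1 (n - i)) with
    | some r => some r
    | none => pvBOuter s n half is

def pattern_repeating_alt (string : String) : String × Int :=
  let s := string.toList
  let n : Int := (PySem.Chars.len s : Int)
  let half := PySem.Int.floordiv n 2
  match pvBOuter s n half (PySem.List.pyRange 2 half) with
  | some r => r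
  | none => ("", 0)

-- ===== PRECONDITION & SPEC =====
def Spec_pattern_repeating (string : String) (out : String × Int) : Prop := out = pattern_repeating_alt string
instance (string : String) (out : String × Int) : Decidable (Spec_pattern_repeating string out) := by unfold Spec_pattern_repeating; infer_instance

-- ===== CLAIM (what is proved, stated in full; the proofs are below) =====
def Claim_equal_pattern_repeating : Prop := ∀ (string : String), Dom_pattern_repeating string → Spec_pattern_repeating string (pattern_repeating string)

-- ===== LEMMAS AND PROOFS =====

theorem pv_go_nil (sub : List Char) (fuel : Nat) (acc : Nat) :
    PySem.Chars.count.go sub fuel [] acc = acc := by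
  cases fuel <;> rfl

theorem pv_go_cons (sub : List Char) (fuel : Nat) (h : Char) (t : List Char) (acc : Nat) :
    PySem.Chars.count.go sub (fuel + 1) (h :: t) acc =
      if sub.isPrefixOf (h :: t) then
        PySem.Chars.count.go sub fuel ((h :: t).drop sub.length) (acc + 1)
      else PySem.Chars.count.go sub fuel t acc := by
  rfl

theorem pv_go_fuel (sub : List Char) (hsub : sub ≠ []) :
    ∀ (fuel : Nat) (l : List Char) (fuel' acc : Nat), l.length ≤ fuel → l.length ≤ fuel' →
      PySem.Chars.count.go sub fuel l acc = PySem.Chars.count.go sub fuel' l acc := by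
  intro fuel
  induction fuel with
  | zero =>
    intro l fuel' acc h1 _
    rw [List.eq_nil_of_length_eq_zero (Nat.le_zero.mp h1), pv_go_nil, pv_go_nil]
  | succ fuel ih =>
    intro l fuel' acc h1 h2
    cases l with
    | nil => rw [pv_go_nil, pv_go_nil]
    | cons h t =>
      cases fuel' with
      | zero => simp at h2
      | succ fuel' =>
        have hslen : 1 ≤ sub.length := List.length_pos_iff.mpr hsub
        rw [pv_go_cons, pv_go_cons]
        simp only [List.length_cons] at h1 h2
        split_ifs with hp
        · apply ih
          · simp only [List.length_drop, List.length_cons]; omega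
          · simp only [List.length_drop, List.length_cons]; omega
        · exact ih t fuel' acc (by omega) (by omega)

theorem pv_go_acc (sub : List Char) :
    ∀ (fuel : Nat) (l : List Char) (acc : Nat),
      PySem.Chars.count.go sub fuel l acc = acc + PySem.Chars.count.go sub fuel l 0 := by
  intro fuel
  induction fuel with
  | zero => intro l acc; rfl
  | succ fuel ih =>
    intro l acc
    cases l with
    | nil => rw [pv_go_nil, pv_go_nil]; omega
    | cons h t =>
      rw [pv_go_cons, pv_go_cons]
      split_ifs with hp
      · rw [ih _ (acc + 1), ih _ (0 + 1)]; omega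
      · rw [ih t acc]

theorem pv_count_short (sub l : List Char) (hsub : sub ≠ []) (h : l.length < sub.length) :
    PySem.Chars.count l sub = 0 := by
  have hne : sub.isEmpty = false := by simpa [List.isEmpty_iff] using hsub
  simp only [PySem.Chars.count, hne, Bool.false_eq_true, if_false]
  induction l with
  | nil => exact pv_go_nil _ _ _
  | cons c t ih =>
    rw [show (c :: t).length = t.length + 1 from rfl, pv_go_cons]
    have hp : sub.isPrefixOf (c :: t) = false := by
      by_contra hcon
      have : sub <+: (c :: t) := List.isPrefixOf_iff_prefix.mp (by simpa using hcon)
      have := this.length_le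
      simp only [List.length_cons] at this h; omega
    rw [hp]
    simp only [Bool.false_eq_true, if_false]
    exact ih (by simp only [List.length_cons] at h ⊢; omega)

theorem pv_count_take (sub l : List Char) (hsub : sub ≠ []) (hpre : sub <+: l) :
    PySem.Chars.count l sub = 1 + PySem.Chars.count (l.drop sub.length) sub := by
  have hne : sub.isEmpty = false := by simpa [List.isEmpty_iff] using hsub
  have hslen : 1 ≤ sub.length := List.length_pos_iff.mpr hsub
  cases l with
  | nil =>
    exfalso; exact hsub (List.prefix_nil.mp hpre)
  | cons c t =>
    simp only [PySem.Chars.count, hne, Bool.false_eq_true, if_false]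
    rw [show (c :: t).length = t.length + 1 from rfl, pv_go_cons,
      if_pos (List.isPrefixOf_iff_prefix.mpr hpre), pv_go_acc]
    congr 1
    apply pv_go_fuel sub hsub
    · simp; omega
    · simp

theorem pv_count_skip (sub : List Char) (h : Char) (t : List Char) (hsub : sub ≠ [])
    (hnot : ¬ sub <+: (h :: t)) :
    PySem.Chars.count (h :: t) sub = PySem.Chars.count t sub := by
  have hne : sub.isEmpty = false := by simpa [List.isEmpty_iff] using hsub
  simp only [PySem.Chars.count, hne, Bool.false_eq_true, if_false]
  rw [show (h :: t).length = t.length + 1 from rfl, pv_go_cons,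
    if_neg (by simpa [List.isPrefixOf_iff_prefix] using hnot)]

theorem pv_pred_iff (s sub : List Char) (i : Nat) (hlen : sub.length = i) (j : Nat) :
    (PySem.List.slice s (some (j : Int)) (some ((j : Int) + (i : Int))) == sub) = true
      ↔ sub <+: s.drop j := by
  rw [PySem.List.slice_natCast_add, beq_iff_eq, List.prefix_iff_eq_take, hlen, eq_comm]

theorem pv_greedy_occ (s sub : List Char) (i : Nat) (hi : 1 ≤ i) (hin : i ≤ s.length)
    (hlen : sub.length = i) :
    ∀ (K k bound : Nat) (c : Int), s.length - i + 1 - k ≤ K →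
      ((((List.range' k (s.length - i + 1 - k)).filter
            (fun j : Nat => PySem.List.slice s (some (j : Int)) (some ((j : Int) + (i : Int))) == sub)).map
          (fun j : Nat => (j : Int))).foldl
        (fun (st : Int × Int) p => if st.2 + (i : Int) ≤ p then (st.1 + 1, p) else st)
        (c, (bound : Int) - (i : Int))).1
      = c + (PySem.Chars.count (s.drop (max k bound)) sub : Int) := by
  have hsub : sub ≠ [] := by
    intro h; rw [h] at hlen; simp at hlen; omega
  intro K
  induction K with
  | zero =>
    intro k bound c hK
    have h0 : s.length - i + 1 - k = 0 := by omega
    rw [h0, pv_count_short sub _ hsub (by simp only [List.length_drop, hlen]; omega)]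
    simp
  | succ K ih =>
    intro k bound c hK
    rcases Nat.eq_zero_or_pos (s.length - i + 1 - k) with h0 | hpos
    · rw [h0, pv_count_short sub _ hsub (by simp only [List.length_drop, hlen]; omega)]
      simp
    · have hk : k ≤ s.length - i := by omega
      have hsplit : s.length - i + 1 - k = (s.length - i + 1 - (k + 1)) + 1 := by omega
      rw [hsplit, List.range'_succ, List.filter_cons]
      by_cases hp : (PySem.List.slice s (some (k : Int)) (some ((k : Int) + (i : Int))) == sub) = true
      · rw [if_pos hp]
        simp only [List.map_cons, List.foldl_cons]
        by_cases hb : bound ≤ k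
        · rw [if_pos (by omega)]
          have hkk : (k : Int) = ((k + i : Nat) : Int) - (i : Int) := by push_cast; ring
          rw [hkk, ih (k + 1) (k + i) (c + 1) (by omega)]
          have hmax1 : max (k + 1) (k + i) = k + i := by omega
          have hmax2 : max k bound = k := by omega
          rw [hmax1, hmax2, pv_count_take sub _ hsub ((pv_pred_iff s sub i hlen k).mp hp),
            List.drop_drop, hlen]
          push_cast
          ring
        · rw [if_neg (by omega)]
          rw [ih (k + 1) bound c (by omega)]
          have hmx : max (k + 1) bound = max k bound := by omega
          rw [hmx]
      · rw [if_neg hp]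
        rw [ih (k + 1) bound c (by omega)]
        by_cases hb : bound ≤ k
        · have hmax1 : max (k + 1) bound = k + 1 := by omega
          have hmax2 : max k bound = k := by omega
          rw [hmax1, hmax2]
          have hkn : k < s.length := by omega
          have hnot : ¬ sub <+: s.drop k := fun hcon => hp ((pv_pred_iff s sub i hlen k).mpr hcon)
          rw [List.drop_eq_getElem_cons hkn] at hnot
          rw [List.drop_eq_getElem_cons hkn, pv_count_skip sub _ _ hsub hnot]
        · have hmx : max (k + 1) bound = max k bound := by omega
          rw [hmx]

theorem pv_greedy_count (s sub : List Char) (i : Nat) (hi : 1 ≤ i) (hin : i ≤ s.length)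
    (hlen : sub.length = i) :
    pvGreedy (i : Int)
      (((List.range (s.length - i + 1)).filter
          (fun j : Nat => PySem.List.slice s (some (j : Int)) (some ((j : Int) + (i : Int))) == sub)).map
        (fun j : Nat => (j : Int)))
      = (PySem.Chars.count s sub : Int) := by
  unfold pvGreedy
  have h := pv_greedy_occ s sub i hi hin hlen (s.length - i + 1) 0 0 0 (by omega)
  simpa [List.range_eq_range'] using h


-- getD of B's grouping fold: the positions of sub, in ascending order
theorem pv_getD_group (s : List Char) (i : Int) (js : List Int) (sub : List Char)
    (d : PySem.Dict (List Char) (List Int)) :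
    (js.foldl (fun d j =>
        d.modify (PySem.List.slice s (some j) (some (j + i))) [] (· ++ [j])) d).getD sub []
      = d.getD sub []
          ++ js.filter (fun j => PySem.List.slice s (some j) (some (j + i)) == sub) := by
  have h := PySem.Dict.getD_foldl_modify_append
    (js.map (fun j => (PySem.List.slice s (some j) (some (j + i)), j))) d sub
  rw [List.foldl_map] at h
  simp only [List.filter_map, List.map_map, Function.comp_def] at h
  simpa using h

theorem pv_cnt_lookup (s : List Char) (i : Nat) (hi : 1 ≤ i) (hin : i ≤ s.length)
    (j : Int) (hj : j ∈ PySem.List.pyRange 1 ((s.length : Int) - (i : Int))) :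
    (pvCnt s (s.length : Int) (i : Int)).getD
        (PySem.List.slice s (some j) (some (j + (i : Int)))) 0
      = (PySem.Chars.count s (PySem.List.slice s (some j) (some (j + (i : Int)))) : Int) := by
  rw [PySem.List.mem_pyRange_one] at hj
  obtain ⟨hj1, hj2⟩ := hj
  have hj0 : (0 : Int) ≤ j := by omega
  set jn := j.toNat with hjn
  have hjc : j = (jn : Int) := (Int.toNat_of_nonneg hj0).symm
  have hjlt : jn < s.length - i := by omega
  set sub := PySem.List.slice s (some j) (some (j + (i : Int))) with hsubdef
  have hsubeq : sub = (s.drop jn).take i := by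
    rw [hsubdef, hjc, PySem.List.slice_natCast_add]
  have hlen : sub.length = i := by
    rw [hsubeq]; simp only [List.length_take, List.length_drop]; omega
  have hrange : PySem.List.pyRange 0 ((s.length : Int) - (i : Int) + 1)
      = (List.range (s.length - i + 1)).map (fun k : Nat => (k : Int)) := by
    rw [show ((s.length : Int) - (i : Int) + 1) = ((s.length - i + 1 : Nat) : Int) by omega,
      PySem.List.pyRange_zero_natCast]
  -- positions list stored for sub
  have hgd : (pvPos s (s.length : Int) (i : Int)).getD sub []
      = ((List.range (s.length - i + 1)).filter
            (fun k : Nat =>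
              PySem.List.slice s (some (k : Int)) (some ((k : Int) + (i : Int))) == sub)).map
          (fun k : Nat => (k : Int)) := by
    unfold pvPos
    rw [pv_getD_group, PySem.Dict.getD_empty, List.nil_append, hrange, List.filter_map]
    simp only [Function.comp_def]
  -- sub is a key of pos
  have hkeys : (pvPos s (s.length : Int) (i : Int)).keys
      = PySem.Set.ofList ((PySem.List.pyRange 0 ((s.length : Int) - (i : Int) + 1)).map
          (fun j => PySem.List.slice s (some j) (some (j + (i : Int))))) := by
    unfold pvPos
    rw [PySem.Dict.keys_foldl_modify_key (PySem.List.pyRange 0 ((s.length : Int) - (i : Int) + 1))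
      (fun j => PySem.List.slice s (some j) (some (j + (i : Int)))) []
      (fun _ j => (· ++ [j])) PySem.Dict.empty,
      PySem.Dict.keys_empty, PySem.Set.update_nil_left]
  have hmem : sub ∈ (pvPos s (s.length : Int) (i : Int)).keys := by
    rw [hkeys, PySem.Set.mem_ofList]
    exact List.mem_map.mpr ⟨j, by rw [PySem.List.mem_pyRange_one]; omega, hsubdef.symm⟩
  have hnd : (pvPos s (s.length : Int) (i : Int)).keys.Nodup := by
    unfold pvPos
    exact PySem.Dict.nodup_keys_foldl_modify_key _ _ _ _ _ PySem.Dict.nodup_keys_empty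
  have hcont : (pvPos s (s.length : Int) (i : Int)).contains sub = true :=
    (PySem.Dict.contains_iff_mem_keys _ _).mpr hmem
  rw [PySem.Dict.contains_eq_isSome_get?, Option.isSome_iff_exists] at hcont
  obtain ⟨v, hget⟩ := hcont
  have hvd : (pvPos s (s.length : Int) (i : Int)).getD sub [] = v :=
    PySem.Dict.getD_of_get?_eq_some _ [] hget
  have hitems : (sub, v) ∈ (pvPos s (s.length : Int) (i : Int)).items :=
    PySem.Dict.mem_items_of_get?_eq_some _ hget
  -- the cnt dict maps sub to the greedy count of v
  have hmapnodup : ((pvPos s (s.length : Int) (i : Int)).items.map Prod.fst).Nodup := by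
    simpa [PySem.Dict.keys] using hnd
  have hcntitems : (pvCnt s (s.length : Int) (i : Int)).items
      = (pvPos s (s.length : Int) (i : Int)).items.map
          (fun p => (p.1, pvGreedy (i : Int) p.2)) := by
    unfold pvCnt
    rw [PySem.Dict.items_foldl_insert_fresh _ Prod.fst (fun p => pvGreedy (i : Int) p.2)
      PySem.Dict.empty (fun a _ => PySem.Dict.contains_empty _) hmapnodup]
    rfl
  have hcntnd : (pvCnt s (s.length : Int) (i : Int)).keys.Nodup := by
    simp only [PySem.Dict.keys, hcntitems, List.map_map]
    simpa [Function.comp] using hmapnodup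
  have hcmem : (sub, pvGreedy (i : Int) v) ∈ (pvCnt s (s.length : Int) (i : Int)).items := by
    rw [hcntitems]
    exact List.mem_map.mpr ⟨(sub, v), hitems, rfl⟩
  rw [PySem.Dict.getD_of_mem_items _ hcmem hcntnd 0, ← hvd, hgd]
  exact pv_greedy_count s sub i hi hin hlen

theorem pv_inner_eq (cnt : PySem.Dict (List Char) Int) (s : List Char) (n i : Int)
    (jl : List Int)
    (h : ∀ j ∈ jl, cnt.getD (PySem.List.slice s (some j) (some (j + i))) 0
          = (PySem.Chars.count s (PySem.List.slice s (some j) (some (j + i))) : Int)) :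
    pvBInner cnt s (PySem.Int.floordiv n 2) i jl = pvAInner s n i jl := by
  induction jl with
  | nil => rfl
  | cons j js ih =>
    simp only [pvAInner, pvBInner]
    rw [h j (List.mem_cons_self ..)]
    exact if_congr Iff.rfl rfl (ih (fun x hx => h x (List.mem_cons_of_mem _ hx)))

theorem pv_outer_eq (s : List Char) (il : List Int)
    (h : ∀ i ∈ il, 2 ≤ i ∧ i < PySem.Int.floordiv (s.length : Int) 2) :
    pvBOuter s (s.length : Int) (PySem.Int.floordiv (s.length : Int) 2) il
      = pvAOuter s (s.length : Int) il := by
  induction il with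
  | nil => rfl
  | cons i is ih =>
    obtain ⟨hi2, hilt⟩ := h i (List.mem_cons_self ..)
    have hhalf : PySem.Int.floordiv (s.length : Int) 2 = ((s.length / 2 : Nat) : Int) := by
      exact_mod_cast PySem.Int.floordiv_natCast s.length 2
    rw [hhalf] at hilt
    have hi0 : (0 : Int) ≤ i := by omega
    set inat := i.toNat with hinat
    have hic : i = (inat : Int) := (Int.toNat_of_nonneg hi0).symm
    have hi1 : 1 ≤ inat := by omega
    have hdle : s.length / 2 ≤ s.length := by omega
    have hin : inat ≤ s.length := by omega
    simp only [pvAOuter, pvBOuter]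
    rw [hic, pv_inner_eq (pvCnt s (s.length : Int) (inat : Int)) s (s.length : Int) (inat : Int) _
      (fun j hj => pv_cnt_lookup s inat hi1 hin j hj)]
    cases pvAInner s (s.length : Int) (inat : Int)
        (PySem.List.pyRange 1 ((s.length : Int) - (inat : Int))) with
    | some r => rfl
    | none => exact ih (fun x hx => h x (List.mem_cons_of_mem _ hx))

-- ===== VERDICT (by name: the statement is the Claim_ definition above) =====
theorem pattern_repeating_spec : Claim_equal_pattern_repeating := by
  intro string _
  show pattern_repeating string = pattern_repeating_alt string
  unfold pattern_repeating pattern_repeating_alt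
  simp only [PySem.Chars.len_eq]
  rw [pv_outer_eq string.toList _ (fun i hi => by
    rw [PySem.List.mem_pyRange_one] at hi; exact hi)]
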